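-- pv_equiv track=rewrite | github.com/Silmagala/Ejercicios-Codo-a-Codo- | funcion12.py | strc
-- ===== SOURCE A (Python) =====
-- def strc(s):
--     end = len(s)
--     # Llegar a la última posición de la última letra
--     while end > 0 and s[end - 1] == ' ':
--         end -= 1
--
--     start = end
--              #Obtener la posición de la primera letra de la última palabra
--     while start > 0 and s[start - 1] != ' ':
--          start -= 1
--     L=end - start
--
--     return L,s[start:end]
-- ===== SOURCE B (Python) =====
-- def strc(s):
--     current = ''
--     last = ''
--     for ch in s:
--         if ch == ' ':
--             if current:
--                 last = current
--             current = ''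
--         else:
--             current += ch
--     if current:
--         last = current
--     return len(last), last
-- ===== Notes on version B (the rewrite author's own statement) =====
-- stated objective: alternative
-- what changed: Replaces A's two backward index-scanning while loops plus a slice with a single forward pass that accumulates space-separated runs and keeps the last non-empty one.
import Mathlib
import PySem

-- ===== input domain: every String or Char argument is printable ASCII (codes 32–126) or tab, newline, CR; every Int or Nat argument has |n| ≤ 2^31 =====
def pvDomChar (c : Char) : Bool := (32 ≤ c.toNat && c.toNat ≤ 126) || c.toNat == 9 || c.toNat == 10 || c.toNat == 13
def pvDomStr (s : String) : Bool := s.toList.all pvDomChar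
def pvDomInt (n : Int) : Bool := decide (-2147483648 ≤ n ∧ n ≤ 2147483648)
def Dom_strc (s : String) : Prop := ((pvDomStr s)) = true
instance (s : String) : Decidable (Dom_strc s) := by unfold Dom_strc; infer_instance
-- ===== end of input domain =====

-- B replaces A's two backward index-scanning while loops + slice by one forward pass
-- accumulating ' '-separated runs and keeping the last non-empty one (objective: alternative).

-- ===== PORT A =====
-- 'while i > 0 and p(s[i-1]): i -= 1' as recursion on the index; the index i-1 is always
-- in range, so List.getD is exact here.
def strcWhile (l : List Char) (p : Char → Bool) : Nat → Nat
  | 0 => 0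
  | e + 1 => if p (l.getD e ' ') then strcWhile l p e else e + 1

def strc (s : String) : Int × String :=
  let l := s.toList
  let e := strcWhile l (fun c => c == ' ') l.length
  let st := strcWhile l (fun c => c != ' ') e
  ((e : Int) - (st : Int),
    String.ofList (PySem.List.slice l (some (st : Int)) (some (e : Int))))

-- ===== PORT B =====
def strcAltStep (st : List Char × List Char) (c : Char) : List Char × List Char :=
  if c == ' ' then ([], if st.1 ≠ [] then st.1 else st.2)
  else (st.1 ++ [c], st.2)

def strc_alt (s : String) : Int × String :=
  let st := s.toList.foldl strcAltStep ([], [])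
  let last := if st.1 ≠ [] then st.1 else st.2
  ((last.length : Int), String.ofList last)

-- ===== PRECONDITION & SPEC =====
def Spec_strc (s : String) (out : Int × String) : Prop := out = strc_alt s
instance (s : String) (out : Int × String) : Decidable (Spec_strc s out) := by unfold Spec_strc; infer_instance

-- ===== CLAIM (what is proved, stated in full; the proofs are below) =====
def Claim_equal_strc : Prop := ∀ (s : String), Dom_strc s → Spec_strc s (strc s)

-- ===== LEMMAS AND PROOFS =====

-- the last word as dropWhile/takeWhile on the reversed character list
def specWord (l : List Char) : List Char :=
  ((l.reverse.dropWhile (fun c => c == ' ')).takeWhile (fun c => c != ' ')).reverse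

lemma strcWhile_eq (l : List Char) (p : Char → Bool) :
    ∀ e, e ≤ l.length → strcWhile l p e = ((l.take e).reverse.dropWhile p).length := by
  intro e
  induction e with
  | zero => intro _; simp [strcWhile]
  | succ e ih =>
    intro h
    have he : e < l.length := by omega
    have htake : l.take (e + 1) = l.take e ++ [l[e]] := by
      rw [List.take_add_one, List.getElem?_eq_getElem he]; rfl
    have hget : l.getD e ' ' = l[e] := by
      simp [List.getD, List.getElem?_eq_getElem he]
    have hrev : (l.take (e + 1)).reverse = l[e] :: (l.take e).reverse := by
      rw [htake]; simp
    rw [strcWhile, hget, hrev, List.dropWhile_cons]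
    by_cases hp : p l[e]
    · simp [hp, ih (by omega)]
    · simp [hp, List.length_take]
      omega

lemma foldl_inv (l : List Char) :
    (l.foldl strcAltStep ([], [])).1 = (l.reverse.takeWhile (fun c => c != ' ')).reverse ∧
    (if (l.foldl strcAltStep ([], [])).1 ≠ [] then (l.foldl strcAltStep ([], [])).1
      else (l.foldl strcAltStep ([], [])).2) = specWord l := by
  induction l using List.reverseRecOn with
  | nil => simp [specWord]
  | append_singleton l x ih =>
    obtain ⟨ih1, ih2⟩ := ih
    rw [List.foldl_append]
    by_cases hx : x = ' '
    · subst hx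
      simp only [strcAltStep, List.foldl_cons, List.foldl_nil, beq_self_eq_true,
        if_true]
      constructor
      · simp
      · simpa [specWord] using ih2
    · have hxb : (x == ' ') = false := by simp [hx]
      simp only [strcAltStep, List.foldl_cons, List.foldl_nil, hxb, Bool.false_eq_true,
        if_false]
      constructor
      · simp [hx, ih1]
      · simp [specWord, hx, ih1]

lemma strc_eq_specWord (s : String) :
    strc s = (((specWord s.toList).length : Int), String.ofList (specWord s.toList)) := by
  set l := s.toList with hl
  have hstrc : strc s =
      (((strcWhile l (fun c => c == ' ') l.length : Nat) : Int) -
         ((strcWhile l (fun c => c != ' ') (strcWhile l (fun c => c == ' ') l.length) : Nat) : Int),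
       String.ofList (PySem.List.slice l
         (some ((strcWhile l (fun c => c != ' ') (strcWhile l (fun c => c == ' ') l.length) : Nat) : Int))
         (some ((strcWhile l (fun c => c == ' ') l.length : Nat) : Int)))) := rfl
  rw [hstrc]
  set r1 := l.reverse.dropWhile (fun c => c == ' ') with hr1
  set w := r1.takeWhile (fun c => c != ' ') with hw
  set d := r1.dropWhile (fun c => c != ' ') with hd
  have hsplit1 : l.reverse.takeWhile (fun c => c == ' ') ++ r1 = l.reverse :=
    List.takeWhile_append_dropWhile
  have hr1len : r1.length ≤ l.length := by
    have := List.length_dropWhile_le (p := fun c => c == ' ') (l := l.reverse)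
    simpa using this
  have h1 : strcWhile l (fun c => c == ' ') l.length = r1.length := by
    have := strcWhile_eq l (fun c => c == ' ') l.length le_rfl
    simpa using this
  have hltake : l.take r1.length = r1.reverse := by
    have hl2 : r1.reverse ++ (l.reverse.takeWhile (fun c => c == ' ')).reverse = l := by
      rw [← List.reverse_append, hsplit1, List.reverse_reverse]
    calc l.take r1.length = (r1.reverse ++ (l.reverse.takeWhile (fun c => c == ' ')).reverse).take r1.length := by rw [hl2]
      _ = r1.reverse := List.take_left' (by simp)
  have h2 : strcWhile l (fun c => c != ' ') r1.length = d.length := by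
    have := strcWhile_eq l (fun c => c != ' ') r1.length hr1len
    rw [this, hltake, List.reverse_reverse, ← hd]
  have hsplit2 : w ++ d = r1 := List.takeWhile_append_dropWhile
  have hlen2 : w.length + d.length = r1.length := by
    have := congrArg List.length hsplit2
    simpa using this
  have hspec : specWord l = w.reverse := rfl
  rw [h1, h2]
  clear hstrc
  have hslice : PySem.List.slice l (some (d.length : Int)) (some (r1.length : Int)) = w.reverse := by
    rw [PySem.List.slice_natCast]
    have hdt : (l.take r1.length).drop d.length = w.reverse := by
      rw [hltake, ← hsplit2, List.reverse_append]
      exact List.drop_left' (by simp)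
    rw [← List.drop_take, hdt]
  rw [hslice, hspec]
  have : ((r1.length : Int) - (d.length : Int)) = (w.reverse.length : Int) := by
    simp; omega
  rw [this]

lemma strc_alt_eq_specWord (s : String) :
    strc_alt s = (((specWord s.toList).length : Int), String.ofList (specWord s.toList)) := by
  obtain ⟨_, h2⟩ := foldl_inv s.toList
  simp [strc_alt, h2]

-- ===== VERDICT (by name: the statement is the Claim_ definition above) =====
theorem strc_spec : Claim_equal_strc := by
  intro s _
  unfold Spec_strc
  rw [strc_eq_specWord, strc_alt_eq_specWord]
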